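-- pv_equiv track=rewrite | github.com/GDnichoTP/cyk-algorithm | main.py | apply_unary_rules
-- ===== SOURCE A (Python) =====
-- def apply_unary_rules(cell, rules):
--
--     # himpunan yang berisi non-terminal pada sel
--     to_process = set(cell)
--     processed = set()
--
--     # pengulangan sampai semua non-terminal diproses
--     while to_process:
--         current = to_process.pop()
--         processed.add(current)
--
--         # cek unary rules untuk menambahkan non-terminal ke sel
--         for lhs, rhs in rules.items():
--             for production in rhs:
--                 if len(production) == 1 and production[0] == current:
--                     if lhs not in processed:  # menghindari duplikat
--                         cell.add(lhs)
--                         to_process.add(lhs)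
--
--     return cell
-- ===== SOURCE B (Python) =====
-- def apply_unary_rules(cell, rules):
--     # Faster closure: precompute a reverse index symbol -> [lhs of unary rules],
--     # then a worklist BFS; mutates (and returns) the set `cell`, like the original.
--     index = {}
--     for lhs, rhs in rules.items():
--         for production in rhs:
--             if len(production) == 1:
--                 index.setdefault(production[0], []).append(lhs)
--
--     queue = list(cell)
--     while queue:
--         current = queue.pop(0)
--         for lhs in index.get(current, []):
--             if lhs not in cell:
--                 cell.add(lhs)
--                 queue.append(lhs)
--     return cell
-- ===== Notes on version B (the rewrite author's own statement) =====
-- stated objective: faster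
-- what changed: Instead of rescanning every production of every rule for each processed non-terminal, B builds a reverse index (unary rhs symbol -> list of lhs) once and runs a worklist BFS that only looks up the popped symbol, gating on membership in the growing cell itself.
import Mathlib
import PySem

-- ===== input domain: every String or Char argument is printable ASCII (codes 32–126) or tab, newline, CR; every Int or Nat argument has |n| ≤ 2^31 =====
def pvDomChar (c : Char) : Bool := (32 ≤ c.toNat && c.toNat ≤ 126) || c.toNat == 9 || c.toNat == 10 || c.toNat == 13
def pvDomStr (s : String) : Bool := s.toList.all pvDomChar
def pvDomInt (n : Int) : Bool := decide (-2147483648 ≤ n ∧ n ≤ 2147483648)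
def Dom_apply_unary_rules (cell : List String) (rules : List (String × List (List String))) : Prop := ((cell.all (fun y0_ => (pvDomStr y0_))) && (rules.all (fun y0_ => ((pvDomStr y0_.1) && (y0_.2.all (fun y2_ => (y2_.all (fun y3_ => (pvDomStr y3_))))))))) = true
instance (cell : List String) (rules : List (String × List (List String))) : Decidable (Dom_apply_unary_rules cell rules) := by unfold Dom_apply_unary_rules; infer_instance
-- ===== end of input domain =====

-- B replaces A's per-element scan over all rules by a reverse index (unary rhs symbol → lhs's)
-- plus a worklist BFS (objective: faster). Both Pythons mutate the argument set `cell` in place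
-- and return it; the equivalence proved here is about the return value.
-- Python's set-iteration/pop order is arbitrary; both ports pop the worklist from the front,
-- and both loops carry a fuel bound (cell.length + rules.length + 1, a sound bound on the number
-- of pops) that merely makes the recursion structural.

-- ===== PORT A =====
-- inner double loop of A: for (lhs, rhs) in rules, for production in rhs,
-- state st = (to_process, cell), with `processed` fixed for the whole scan
def pvStepA (cur : String) (processed : List String)
    (st : List String × List String) (r : String × List (List String)) :
    List String × List String :=
  r.2.foldl (fun st prod =>
    if prod.length = 1 ∧ PySem.List.pyGet? prod 0 = some cur then
      if PySem.Set.contains processed r.1 then st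
      else (PySem.Set.add st.1 r.1, PySem.Set.add st.2 r.1)
    else st) st

def pvLoopA (rules : List (String × List (List String))) :
    Nat → List String → List String → List String → List String
  | 0, _, _, cell => cell
  | _ + 1, [], _, cell => cell
  | fuel + 1, cur :: rest, processed, cell =>
    let processed' := PySem.Set.add processed cur
    let st := rules.foldl (pvStepA cur processed') (rest, cell)
    pvLoopA rules fuel st.1 processed' st.2

def apply_unary_rules (cell : List String) (rules : List (String × List (List String))) : List String :=
  let cellS := PySem.Set.ofList cell
  pvLoopA rules (cell.length + rules.length + 1) cellS [] cellS

-- ===== PORT B =====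
-- reverse index: unary rhs symbol → list of lhs, in rule order (setdefault/append)
def pvIndex (rules : List (String × List (List String))) : PySem.Dict String (List String) :=
  rules.foldl (fun d r =>
    r.2.foldl (fun d prod =>
      match prod with
      | [s] => d.modify s [] (· ++ [r.1])
      | _ => d) d) PySem.Dict.empty

-- BFS worklist; state = (queue, cell); `cell` itself is the visited set
def pvLoopB (index : PySem.Dict String (List String)) :
    Nat → List String → List String → List String
  | 0, _, cell => cell
  | _ + 1, [], cell => cell
  | fuel + 1, cur :: rest, cell =>
    let st := (index.getD cur []).foldl (fun (st : List String × List String) lhs =>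
      if PySem.Set.contains st.2 lhs then st
      else (st.1 ++ [lhs], st.2 ++ [lhs])) (rest, cell)
    pvLoopB index fuel st.1 st.2

def apply_unary_rules_alt (cell : List String) (rules : List (String × List (List String))) : List String :=
  let index := pvIndex rules
  let cellS := PySem.Set.ofList cell
  pvLoopB index (cell.length + rules.length + 1) cellS cellS

-- ===== PRECONDITION & SPEC =====
def Spec_apply_unary_rules (cell : List String) (rules : List (String × List (List String))) (out : List String) : Prop := out = apply_unary_rules_alt cell rules
instance (cell : List String) (rules : List (String × List (List String))) (out : List String) : Decidable (Spec_apply_unary_rules cell rules out) := by unfold Spec_apply_unary_rules; infer_instance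

-- ===== CLAIM (what is proved, stated in full; the proofs are below) =====
def Claim_equal_apply_unary_rules : Prop := ∀ (cell : List String) (rules : List (String × List (List String))), Dom_apply_unary_rules cell rules → Spec_apply_unary_rules cell rules (apply_unary_rules cell rules)

-- ===== LEMMAS AND PROOFS =====

-- the list of lhs's of unary rules producing c, in rule order
def pvMatches (rules : List (String × List (List String))) (c : String) : List String :=
  rules.flatMap (fun r => (r.2.filter (fun prod => prod == [c])).map (fun _ => r.1))

-- the index looks up exactly the unary matches
theorem pvIndex_inner_getD (lhs : String) (ps : List (List String)) (c : String)
    (d : PySem.Dict String (List String)) :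
    ((ps.foldl (fun d prod =>
        match prod with
        | [s] => d.modify s [] (· ++ [lhs])
        | _ => d) d).getD c [])
      = d.getD c [] ++ ((ps.filter (fun prod => prod == [c])).map (fun _ => lhs)) := by
  induction ps generalizing d with
  | nil => simp
  | cons prod ps ih =>
    match prod with
    | [] => simpa using ih d
    | s :: s' :: t => simpa using ih d
    | [s] =>
      by_cases hs : s = c
      · subst hs
        simp [ih]
      · have hb : ([s] == [c]) = false := by simp [hs]
        simp only [List.foldl_cons, List.filter_cons, hb, Bool.false_eq_true,
          if_false, ih, PySem.Dict.getD_modify]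
        rw [if_neg (fun h => hs h.symm)]

theorem pvIndex_getD (rules : List (String × List (List String))) (c : String) :
    (pvIndex rules).getD c [] = pvMatches rules c := by
  unfold pvIndex
  suffices h : ∀ (rs : List (String × List (List String))) (d : PySem.Dict String (List String)),
      ((rs.foldl (fun d r =>
          r.2.foldl (fun d prod =>
            match prod with
            | [s] => d.modify s [] (· ++ [r.1])
            | _ => d) d) d).getD c [])
        = d.getD c [] ++ pvMatches rs c by
    simpa [PySem.Dict.getD_empty] using h rules PySem.Dict.empty
  intro rs
  induction rs with
  | nil => intro d; simp [pvMatches]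
  | cons r rs ih =>
    intro d
    simp only [List.foldl_cons]
    rw [ih, pvIndex_inner_getD]
    simp [pvMatches, List.flatMap_cons]

-- A's condition is "prod = [cur]"
theorem pvCond_iff (prod : List String) (cur : String) :
    (prod.length = 1 ∧ PySem.List.pyGet? prod 0 = some cur) ↔ prod = [cur] := by
  match prod with
  | [] => simp [PySem.List.pyGet?]
  | [s] =>
    constructor
    · rintro ⟨-, h⟩
      simp [PySem.List.pyGet?, PySem.List.pyIdx?] at h
      simp [h]
    · rintro h
      injection h with h1 h2
      subst h1
      exact ⟨rfl, by simp [PySem.List.pyGet?, PySem.List.pyIdx?]⟩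
  | s :: s' :: t => simp [PySem.List.pyGet?]

-- A's scan over all rules is a fold over the matched lhs's
theorem pvStepA_eq (cur : String) (processed : List String)
    (rules : List (String × List (List String))) (st : List String × List String) :
    rules.foldl (pvStepA cur processed) st
      = (pvMatches rules cur).foldl (fun st lhs =>
          if PySem.Set.contains processed lhs then st
          else (PySem.Set.add st.1 lhs, PySem.Set.add st.2 lhs)) st := by
  induction rules generalizing st with
  | nil => simp [pvMatches]
  | cons r rs ih =>
    simp only [List.foldl_cons, pvMatches, List.flatMap_cons, List.foldl_append]
    rw [← pvMatches, ← ih]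
    congr 1
    -- per-rule: pvStepA = fold over this rule's matches
    unfold pvStepA
    induction r.2 generalizing st with
    | nil => simp
    | cons prod ps ihp =>
      by_cases hc : prod = [cur]
      · have hcond : prod.length = 1 ∧ PySem.List.pyGet? prod 0 = some cur :=
          (pvCond_iff prod cur).mpr hc
        have hb : (prod == [cur]) = true := by simp [hc]
        simp only [List.foldl_cons, List.filter_cons, hb, if_pos hcond, List.foldl_cons]
        exact ihp _
      · have hcond : ¬ (prod.length = 1 ∧ PySem.List.pyGet? prod 0 = some cur) := by
          intro h; exact hc ((pvCond_iff prod cur).mp h)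
        have hb : (prod == [cur]) = false := by simp [hc]
        simp only [List.foldl_cons, List.filter_cons, hb, if_neg hcond]
        exact ihp _

-- inner lockstep: given the invariant "cell = processed ∪ queue (as sets)",
-- A's gated fold and B's gated fold produce the same (queue, cell), and the invariant persists
theorem pvInner_lockstep (M : List String) (processed : List String) :
    ∀ (toP cell : List String),
      (∀ x, x ∈ cell ↔ (x ∈ processed ∨ x ∈ toP)) →
      (M.foldl (fun st lhs =>
          if PySem.Set.contains processed lhs then st
          else (PySem.Set.add st.1 lhs, PySem.Set.add st.2 lhs)) (toP, cell)
        = M.foldl (fun (st : List String × List String) lhs =>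
            if PySem.Set.contains st.2 lhs then st
            else (st.1 ++ [lhs], st.2 ++ [lhs])) (toP, cell))
      ∧ (∀ x, x ∈ (M.foldl (fun st lhs =>
          if PySem.Set.contains processed lhs then st
          else (PySem.Set.add st.1 lhs, PySem.Set.add st.2 lhs)) (toP, cell)).2
          ↔ (x ∈ processed ∨ x ∈ (M.foldl (fun st lhs =>
              if PySem.Set.contains processed lhs then st
              else (PySem.Set.add st.1 lhs, PySem.Set.add st.2 lhs)) (toP, cell)).1)) := by
  induction M with
  | nil => intro toP cell hinv; exact ⟨rfl, hinv⟩
  | cons lhs M ih =>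
    intro toP cell hinv
    by_cases hp : lhs ∈ processed
    · have hcell : lhs ∈ cell := (hinv lhs).mpr (Or.inl hp)
      simpa [List.foldl_cons, hp, hcell] using ih toP cell hinv
    · by_cases hcell : lhs ∈ cell
      · -- in cell but not processed → in toP; both adds are no-ops; B skips
        have htoP : lhs ∈ toP := ((hinv lhs).mp hcell).resolve_left hp
        have ha : PySem.Set.add toP lhs = toP := by
          simp [PySem.Set.add, PySem.Set.contains_eq_listContains, htoP]
        have hb : PySem.Set.add cell lhs = cell := by
          simp [PySem.Set.add, PySem.Set.contains_eq_listContains, hcell]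
        simpa [List.foldl_cons, hp, hcell, ha, hb] using ih toP cell hinv
      · -- genuinely new: both append
        have htoP : lhs ∉ toP := fun h => hcell ((hinv lhs).mpr (Or.inr h))
        have ha : PySem.Set.add toP lhs = toP ++ [lhs] := by
          simp [PySem.Set.add, PySem.Set.contains_eq_listContains, htoP]
        have hb : PySem.Set.add cell lhs = cell ++ [lhs] := by
          simp [PySem.Set.add, PySem.Set.contains_eq_listContains, hcell]
        have hinv' : ∀ x, x ∈ cell ++ [lhs] ↔ (x ∈ processed ∨ x ∈ toP ++ [lhs]) := by
          intro x
          simp only [List.mem_append, List.mem_singleton, hinv x]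
          tauto
        simpa [List.foldl_cons, hp, hcell, ha, hb] using ih (toP ++ [lhs]) (cell ++ [lhs]) hinv'

-- outer lockstep
theorem pvLoop_lockstep (rules : List (String × List (List String))) :
    ∀ (fuel : Nat) (toP processed cell : List String),
      (∀ x, x ∈ cell ↔ (x ∈ processed ∨ x ∈ toP)) →
      pvLoopA rules fuel toP processed cell = pvLoopB (pvIndex rules) fuel toP cell := by
  intro fuel
  induction fuel with
  | zero => intro toP processed cell _; rfl
  | succ fuel ih =>
    intro toP processed cell hinv
    match toP with
    | [] => rfl
    | cur :: rest =>
      simp only [pvLoopA, pvLoopB]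
      rw [pvIndex_getD, pvStepA_eq]
      have hcur : cur ∈ cell := (hinv cur).mpr (Or.inr (List.mem_cons_self))
      have hinv' : ∀ x, x ∈ cell ↔ (x ∈ PySem.Set.add processed cur ∨ x ∈ rest) := by
        intro x
        rw [hinv x, PySem.Set.mem_add]
        constructor
        · rintro (h | h)
          · exact Or.inl (Or.inl h)
          · rcases List.mem_cons.mp h with h | h
            · exact Or.inl (Or.inr h)
            · exact Or.inr h
        · rintro ((h | h) | h)
          · exact Or.inl h
          · subst h; exact Or.inr List.mem_cons_self
          · exact Or.inr (List.mem_cons_of_mem _ h)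
      obtain ⟨heq, hinv2⟩ := pvInner_lockstep (pvMatches rules cur) (PySem.Set.add processed cur) rest cell hinv'
      rw [← heq]
      exact ih _ _ _ hinv2

-- ===== VERDICT (by name: the statement is the Claim_ definition above) =====
theorem apply_unary_rules_spec : Claim_equal_apply_unary_rules := by
  intro cell rules _
  unfold Spec_apply_unary_rules apply_unary_rules apply_unary_rules_alt
  exact pvLoop_lockstep rules _ _ _ _ (by intro x; simp)
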